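-- pv_equiv track=rewrite | github.com/Shabenoor643/News-AI-bot | src/agents/publisher_agent.py | sanitize_article_headings
-- ===== SOURCE A (Python) =====
-- def sanitize_article_headings(body: str, title: str) -> str:
--     lines = body.splitlines()
--     sanitized = []
--     skip_section = False
--     for line in lines:
--         stripped = line.strip()
--         normalized = stripped.lower().lstrip("#").strip()
--
--         if normalized in {"table of contents", "toc", "faq", "faqs", "frequently asked questions"}:
--             skip_section = True
--             continue
--
--         if skip_section and stripped.startswith("#"):
--             skip_section = False
--
--         if skip_section:
--             continue
--
--         if stripped.startswith("# "):
--             # Keep a single H1 at page title level only.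
--             sanitized.append(f"## {stripped[2:].strip()}")
--         elif stripped.startswith("####"):
--             sanitized.append(f"### {stripped.lstrip('#').strip()}")
--         else:
--             sanitized.append(line)
--     return "\n".join(sanitized).strip()
-- ===== SOURCE B (Python) =====
-- _TOC = {"table of contents", "toc", "faq", "faqs", "frequently asked questions"}
--
--
-- def _is_toc(line):
--     return line.strip().lower().lstrip("#").strip() in _TOC
--
--
-- def _transform(line):
--     s = line.strip()
--     if s.startswith("# "):
--         return "## " + s[2:].strip()
--     if s.startswith("####"):
--         return "### " + s.lstrip("#").strip()
--     return line
--
--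
-- def sanitize_article_headings(body: str, title: str) -> str:
--     it = iter(body.splitlines())
--     out = []
--     for line in it:
--         if _is_toc(line):
--             # inner loop: consume lines until a heading that is not itself TOC/FAQ,
--             # which is transformed immediately; then resume the outer loop
--             for nxt in it:
--                 if nxt.strip().startswith("#") and not _is_toc(nxt):
--                     out.append(_transform(nxt))
--                     break
--         else:
--             out.append(_transform(line))
--     return "\n".join(out).strip()
-- ===== Notes on version B (the rewrite author's own statement) =====
-- stated objective: alternative
-- what changed: Replaces the boolean skip_section flag threaded through one loop with two loops over a shared iterator: an outer loop that emits transformed lines and, on a TOC/FAQ heading, an inner loop that consumes lines up to the next non-TOC heading (transformed immediately); heading normalization and transformation are hoisted into named helpers.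
import Mathlib
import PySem

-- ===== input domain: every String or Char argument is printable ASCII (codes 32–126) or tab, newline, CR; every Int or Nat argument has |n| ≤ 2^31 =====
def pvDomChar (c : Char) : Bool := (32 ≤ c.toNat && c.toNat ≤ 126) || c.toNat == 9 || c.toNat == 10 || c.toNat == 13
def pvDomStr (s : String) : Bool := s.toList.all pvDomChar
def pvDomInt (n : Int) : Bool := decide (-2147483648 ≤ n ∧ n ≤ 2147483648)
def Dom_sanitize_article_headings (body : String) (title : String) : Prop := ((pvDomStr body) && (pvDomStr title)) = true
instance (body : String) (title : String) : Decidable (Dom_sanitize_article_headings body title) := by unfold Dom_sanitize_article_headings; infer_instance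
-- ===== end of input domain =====

-- B replaces A's boolean skip_section flag with a nested skip loop over a shared iterator (same cost, different decomposition).


-- ===== PORT A =====
-- Python set literal of five string constants; membership over it is exact as list membership.
def pvTocSetA : List (List Char) :=
  ["table of contents".toList, "toc".toList, "faq".toList, "faqs".toList,
   "frequently asked questions".toList]

-- one iteration of A's for-loop over state (sanitized, skip_section);
-- .lstrip("#") is ported by hand as dropWhile (· == '#') (exact: every stripped char is '#')
def pvStepA (st : List String × Bool) (line : String) : List String × Bool :=
  let stripped := PySem.Str.strip line
  let normalized := PySem.Chars.strip ((PySem.Chars.lower stripped.toList).dropWhile (· == '#'))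
  if pvTocSetA.contains normalized then (st.1, true)
  else
    let skip := if st.2 && PySem.Str.startswith stripped "#" then false else st.2
    if skip then (st.1, true)
    else
      if PySem.Str.startswith stripped "# " then
        (st.1 ++ [String.ofList ("## ".toList ++ PySem.Chars.strip (PySem.List.slice stripped.toList (some 2) none))], skip)
      else if PySem.Str.startswith stripped "####" then
        (st.1 ++ [String.ofList ("### ".toList ++ PySem.Chars.strip (stripped.toList.dropWhile (· == '#')))], skip)
      else (st.1 ++ [line], skip)

def sanitize_article_headings (body : String) (title : String) : String :=
  let lines := PySem.Str.splitlines body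
  let sanitized := (lines.foldl pvStepA ([], false)).1
  PySem.Str.strip (PySem.Str.join "\n" sanitized)

-- ===== PORT B =====
def pvTocSetB : List (List Char) :=
  ["table of contents".toList, "toc".toList, "faq".toList, "faqs".toList,
   "frequently asked questions".toList]

def pvIsTocB (line : String) : Bool :=
  pvTocSetB.contains (PySem.Chars.strip ((PySem.Chars.lower (PySem.Str.strip line).toList).dropWhile (· == '#')))

def pvTransB (line : String) : String :=
  let s := PySem.Str.strip line
  if PySem.Str.startswith s "# " then
    String.ofList ("## ".toList ++ PySem.Chars.strip (PySem.List.slice s.toList (some 2) none))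
  else if PySem.Str.startswith s "####" then
    String.ofList ("### ".toList ++ PySem.Chars.strip (s.toList.dropWhile (· == '#')))
  else line

-- outer loop (pvGoB) / inner skip loop (pvSkipB) over the shared iterator
mutual
def pvGoB : List String → List String
  | [] => []
  | l :: ls => if pvIsTocB l then pvSkipB ls else pvTransB l :: pvGoB ls
def pvSkipB : List String → List String
  | [] => []
  | l :: ls =>
      if PySem.Str.startswith (PySem.Str.strip l) "#" && !pvIsTocB l then
        pvTransB l :: pvGoB ls
      else pvSkipB ls
end

def sanitize_article_headings_alt (body : String) (title : String) : String :=
  PySem.Str.strip (PySem.Str.join "\n" (pvGoB (PySem.Str.splitlines body)))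

-- ===== PRECONDITION & SPEC =====
def Spec_sanitize_article_headings (body : String) (title : String) (out : String) : Prop := out = sanitize_article_headings_alt body title
instance (body : String) (title : String) (out : String) : Decidable (Spec_sanitize_article_headings body title out) := by unfold Spec_sanitize_article_headings; infer_instance

-- ===== CLAIM (what is proved, stated in full; the proofs are below) =====
def Claim_equal_sanitize_article_headings : Prop := ∀ (body : String) (title : String), Dom_sanitize_article_headings body title → Spec_sanitize_article_headings body title (sanitize_article_headings body title)

-- ===== LEMMAS AND PROOFS =====

-- A's flag-carrying fold equals B's pair of mutually recursive loops
theorem pv_fold_eq (ls : List String) : ∀ acc : List String,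
    (List.foldl pvStepA (acc, false) ls).1 = acc ++ pvGoB ls ∧
    (List.foldl pvStepA (acc, true) ls).1 = acc ++ pvSkipB ls := by
  induction ls with
  | nil => intro acc; simp [pvGoB, pvSkipB]
  | cons l ls ih =>
    intro acc
    constructor
    · simp only [List.foldl, pvStepA, pvGoB, pvIsTocB, pvTransB, pvTocSetA, pvTocSetB]
      split_ifs with h1 h2 h3 <;>
        simp_all [ih, List.append_assoc]
    · simp only [List.foldl, pvStepA, pvSkipB, pvIsTocB, pvTransB, pvTocSetA, pvTocSetB]
      split_ifs with h1 h2 h3 h4 <;>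
        simp_all [ih, List.append_assoc]

-- ===== VERDICT (by name: the statement is the Claim_ definition above) =====
theorem sanitize_article_headings_spec : Claim_equal_sanitize_article_headings := by
  intro body title _
  unfold Spec_sanitize_article_headings sanitize_article_headings sanitize_article_headings_alt
  simp [(pv_fold_eq (PySem.Str.splitlines body) []).1]
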